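-- pv_equiv track=rewrite | github.com/Macorov/University_Practice | practice64.py | function_name
-- ===== SOURCE A (Python) =====
-- def function_name(word):
--     lst = []
--     for i in word:
--         if i not in lst:
--             lst.append(i)
--     dic = {}
--     pindex = 0
--     nindex =- len(word)
--     count = 0
--     for i in lst:
--         pindex = 0
--         nindex = -len(word)
--         count = 0
--         for k in word:
--             if i == k:
--                 if count == 0:
--                     dic[i] = [pindex,nindex]
--                     count += 1
--                 else:
--                     temp = dic[i]
--                     temp.append(pindex)
--                     temp.append(nindex)
--                     dic[i] = temp
--             pindex += 1
--             nindex += 1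
--     return dic
-- ===== SOURCE B (Python) =====
-- def function_name(word):
--     # Build an index table char -> list of positive indices in one pass,
--     # then reshape each list into the interleaved [p, p-n, ...] form.
--     positions = {}
--     for p, c in enumerate(word):
--         positions.setdefault(c, []).append(p)
--     n = len(word)
--     return {c: [x for p in ps for x in (p, p - n)] for c, ps in positions.items()}
-- ===== Notes on version B (the rewrite author's own statement) =====
-- stated objective: faster
-- what changed: B replaces A's dedup list plus one full re-scan of the word per distinct character with a single enumerate pass building a char->positions table, then a reshape pass interleaving p and p-n.
import Mathlib
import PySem

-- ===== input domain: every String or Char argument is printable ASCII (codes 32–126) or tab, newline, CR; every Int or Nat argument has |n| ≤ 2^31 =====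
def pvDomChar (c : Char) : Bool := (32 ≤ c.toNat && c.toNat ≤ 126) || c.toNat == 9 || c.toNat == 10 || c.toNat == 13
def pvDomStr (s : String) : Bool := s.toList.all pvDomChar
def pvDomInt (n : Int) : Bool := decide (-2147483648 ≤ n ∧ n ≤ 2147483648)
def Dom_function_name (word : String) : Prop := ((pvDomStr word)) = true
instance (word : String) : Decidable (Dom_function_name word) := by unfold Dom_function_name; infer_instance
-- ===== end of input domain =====

-- B builds a char → positions index in one enumerate pass and then reshapes it, instead of
-- A's full re-scan of the word for each distinct character (objective: faster).

-- ===== PORT A =====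
-- the body of A's inner 'for k in word' loop; state = (dic, pindex, nindex, count)
def pvAStep (i : Char) (s : PySem.Dict String (List Int) × Int × Int × Int) (k : Char) :
    PySem.Dict String (List Int) × Int × Int × Int :=
  if i == k then
    if s.2.2.2 == 0 then
      (s.1.insert (String.ofList [i]) [s.2.1, s.2.2.1], s.2.1 + 1, s.2.2.1 + 1, s.2.2.2 + 1)
    else
      -- dic[i] exists here (count ≠ 0), so 'temp = dic[i]' is getD with unreachable default
      (s.1.insert (String.ofList [i]) (s.1.getD (String.ofList [i]) [] ++ [s.2.1, s.2.2.1]),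
       s.2.1 + 1, s.2.2.1 + 1, s.2.2.2)
  else (s.1, s.2.1 + 1, s.2.2.1 + 1, s.2.2.2)

def function_name (word : String) : List (String × List Int) :=
  let chars := word.toList
  let lst := chars.foldl (fun (lst : List Char) i => if lst.contains i then lst else lst ++ [i]) []
  let n : Int := chars.length
  let dic := lst.foldl (fun dic i => (chars.foldl (pvAStep i) (dic, 0, -n, 0)).1) PySem.Dict.empty
  dic.items

-- ===== PORT B =====
def function_name_alt (word : String) : List (String × List Int) :=
  let chars := word.toList
  -- positions.setdefault(c, []).append(p)  ≡  positions[c] = positions.get(c, []) + [p]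
  let positions := (PySem.List.enumerate chars 0).foldl
    (fun (d : PySem.Dict String (List Int)) pc => d.modify (String.ofList [pc.2]) [] (· ++ [pc.1]))
    PySem.Dict.empty
  let n : Int := chars.length
  -- dict comprehension over items of a dict (keys already distinct) = map over the items
  positions.items.map (fun p => (p.1, p.2.flatMap (fun q => [q, q - n])))

-- ===== PRECONDITION & SPEC =====
def Spec_function_name (word : String) (out : List (String × List Int)) : Prop := out = function_name_alt word
instance (word : String) (out : List (String × List Int)) : Decidable (Spec_function_name word out) := by unfold Spec_function_name; infer_instance

-- ===== CLAIM (what is proved, stated in full; the proofs are below) =====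
def Claim_equal_function_name : Prop := ∀ (word : String), Dom_function_name word → Spec_function_name word (function_name word)

-- ===== LEMMAS AND PROOFS =====

-- interleaved occurrence list of i in ks, indices starting at p, negative shift n
def pvOccs (i : Char) (n : Int) : List Char → Int → List Int
  | [], _ => []
  | k :: ks, p => (if i == k then [p, p - n] else []) ++ pvOccs i n ks (p + 1)

theorem pvKey_injective : Function.Injective (fun c => String.ofList [c]) := by
  intro a b h
  rw [String.ofList_inj] at h
  exact List.singleton_injective h

theorem pvOccs_nil_of_not_mem (i : Char) (n : Int) (ks : List Char) (p : Int) (h : i ∉ ks) :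
    pvOccs i n ks p = [] := by
  induction ks generalizing p with
  | nil => rfl
  | cons k ks ih =>
    simp only [List.mem_cons, not_or] at h
    simp [pvOccs, ih _ h.2, h.1]

theorem pvOccs_eq_flatMap (i : Char) (n : Int) (ks : List Char) :
    ∀ p : Int, pvOccs i n ks p =
      (((PySem.List.enumerate ks p).filter (fun pc => pc.2 == i)).map (·.1)).flatMap
        (fun q => [q, q - n]) := by
  induction ks with
  | nil => intro p; simp [pvOccs, PySem.List.enumerate_nil]
  | cons k ks ih =>
    intro p
    rw [PySem.List.enumerate_cons]
    by_cases h : i = k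
    · subst h
      simp [pvOccs, ih]
    · have hb : (k == i) = false := by simp [Ne.symm h]
      have hb' : (i == k) = false := by simp [h]
      simp [pvOccs, hb, hb', ih]

theorem pvInner_one (i : Char) (n : Int) (ks : List Char) :
    ∀ (dic : PySem.Dict String (List Int)) (p : Int),
      ks.foldl (pvAStep i) (dic, p, p - n, 1) =
        ((if i ∈ ks then
            dic.insert (String.ofList [i]) (dic.getD (String.ofList [i]) [] ++ pvOccs i n ks p)
          else dic),
         p + ks.length, p - n + ks.length, 1) := by
  induction ks with
  | nil => intro dic p; simp
  | cons k ks ih =>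
    intro dic p
    rw [List.foldl_cons]
    by_cases hik : i = k
    · subst hik
      have hstep : pvAStep i (dic, p, p - n, 1) i =
          (dic.insert (String.ofList [i]) (dic.getD (String.ofList [i]) [] ++ [p, p - n]),
           p + 1, p - n + 1, 1) := by
        simp [pvAStep]
      have hm : i ∈ i :: ks := List.mem_cons_self
      rw [hstep, show p - n + 1 = (p + 1) - n from by ring, ih, if_pos hm]
      by_cases hmem : i ∈ ks
      · rw [if_pos hmem, PySem.Dict.getD_insert_self, PySem.Dict.insert_insert_self]
        refine Prod.ext ?_ (Prod.ext ?_ (Prod.ext ?_ rfl))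
        · simp [pvOccs]
        · push_cast [List.length_cons]; ring
        · push_cast [List.length_cons]; ring
      · rw [if_neg hmem]
        refine Prod.ext ?_ (Prod.ext ?_ (Prod.ext ?_ rfl))
        · simp [pvOccs, pvOccs_nil_of_not_mem i n ks _ hmem]
        · push_cast [List.length_cons]; ring
        · push_cast [List.length_cons]; ring
    · have hstep : pvAStep i (dic, p, p - n, 1) k = (dic, p + 1, p - n + 1, 1) := by
        simp [pvAStep, hik]
      rw [hstep, show p - n + 1 = (p + 1) - n from by ring, ih]
      have hocc : pvOccs i n (k :: ks) p = pvOccs i n ks (p + 1) := by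
        simp [pvOccs, hik]
      by_cases hmem : i ∈ ks
      · rw [if_pos hmem, if_pos (List.mem_cons_of_mem k hmem), hocc]
        refine Prod.ext rfl (Prod.ext ?_ (Prod.ext ?_ rfl))
        · push_cast [List.length_cons]; ring
        · push_cast [List.length_cons]; ring
      · rw [if_neg hmem, if_neg (show ¬ i ∈ k :: ks from by simp [hik, hmem])]
        refine Prod.ext rfl (Prod.ext ?_ (Prod.ext ?_ rfl))
        · push_cast [List.length_cons]; ring
        · push_cast [List.length_cons]; ring

theorem pvInner_zero (i : Char) (n : Int) (ks : List Char) :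
    ∀ (dic : PySem.Dict String (List Int)) (p : Int),
      ks.foldl (pvAStep i) (dic, p, p - n, 0) =
        ((if i ∈ ks then dic.insert (String.ofList [i]) (pvOccs i n ks p) else dic),
         p + ks.length, p - n + ks.length, if i ∈ ks then (1 : Int) else 0) := by
  induction ks with
  | nil => intro dic p; simp
  | cons k ks ih =>
    intro dic p
    rw [List.foldl_cons]
    by_cases hik : i = k
    · subst hik
      have hstep : pvAStep i (dic, p, p - n, 0) i =
          (dic.insert (String.ofList [i]) [p, p - n], p + 1, p - n + 1, 1) := by
        simp [pvAStep]
      have hm : i ∈ i :: ks := List.mem_cons_self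
      rw [hstep, show p - n + 1 = (p + 1) - n from by ring, pvInner_one, if_pos hm, if_pos hm]
      by_cases hmem : i ∈ ks
      · rw [if_pos hmem, PySem.Dict.getD_insert_self, PySem.Dict.insert_insert_self]
        refine Prod.ext ?_ (Prod.ext ?_ (Prod.ext ?_ rfl))
        · simp [pvOccs]
        · push_cast [List.length_cons]; ring
        · push_cast [List.length_cons]; ring
      · rw [if_neg hmem]
        refine Prod.ext ?_ (Prod.ext ?_ (Prod.ext ?_ rfl))
        · simp [pvOccs, pvOccs_nil_of_not_mem i n ks _ hmem]
        · push_cast [List.length_cons]; ring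
        · push_cast [List.length_cons]; ring
    · have hstep : pvAStep i (dic, p, p - n, 0) k = (dic, p + 1, p - n + 1, 0) := by
        simp [pvAStep, hik]
      rw [hstep, show p - n + 1 = (p + 1) - n from by ring, ih]
      have hocc : pvOccs i n (k :: ks) p = pvOccs i n ks (p + 1) := by
        simp [pvOccs, hik]
      by_cases hmem : i ∈ ks
      · rw [if_pos hmem, if_pos hmem, if_pos (List.mem_cons_of_mem k hmem),
            if_pos (List.mem_cons_of_mem k hmem), hocc]
        refine Prod.ext rfl (Prod.ext ?_ (Prod.ext ?_ rfl))
        · push_cast [List.length_cons]; ring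
        · push_cast [List.length_cons]; ring
      · rw [if_neg hmem, if_neg hmem,
            if_neg (show ¬ i ∈ k :: ks from by simp [hik, hmem]),
            if_neg (show ¬ i ∈ k :: ks from by simp [hik, hmem])]
        refine Prod.ext rfl (Prod.ext ?_ (Prod.ext ?_ rfl))
        · push_cast [List.length_cons]; ring
        · push_cast [List.length_cons]; ring

theorem pvA_eq (word : String) :
    function_name word = (PySem.Set.ofList word.toList).map
      (fun c => (String.ofList [c], pvOccs c (word.toList.length : Int) word.toList 0)) := by
  unfold function_name
  dsimp only
  have hlst : List.foldl (fun (lst : List Char) i => if lst.contains i then lst else lst ++ [i])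
      [] word.toList = PySem.Set.ofList word.toList := rfl
  rw [hlst]
  have hcong : (PySem.Set.ofList word.toList).foldl
      (fun dic i => (word.toList.foldl (pvAStep i) (dic, 0, -(word.toList.length : Int), 0)).1)
      PySem.Dict.empty =
      (PySem.Set.ofList word.toList).foldl
      (fun dic i => dic.insert (String.ofList [i]) (pvOccs i (word.toList.length : Int) word.toList 0))
      PySem.Dict.empty := by
    apply PySem.List.foldl_congr_mem _ _ _
    intro dic i hi
    have hmem : i ∈ word.toList := (PySem.Set.mem_ofList word.toList i).1 hi
    rw [show -(word.toList.length : Int) = 0 - (word.toList.length : Int) from by ring,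
        pvInner_zero]
    simp [hmem]
  rw [hcong,
      PySem.Dict.items_foldl_insert_fresh (PySem.Set.ofList word.toList)
        (fun i => String.ofList [i]) (fun i => pvOccs i (word.toList.length : Int) word.toList 0)
        PySem.Dict.empty
        (by intro a _; exact PySem.Dict.contains_empty _)
        ((PySem.Set.nodup_ofList word.toList).map pvKey_injective)]
  simp
  rfl

theorem pvB_eq (word : String) :
    function_name_alt word = (PySem.Set.ofList word.toList).map
      (fun c => (String.ofList [c], pvOccs c (word.toList.length : Int) word.toList 0)) := by
  unfold function_name_alt
  dsimp only
  set chars := word.toList with hchars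
  set l := PySem.List.enumerate chars 0 with hl
  set positions := l.foldl
    (fun (d : PySem.Dict String (List Int)) pc => d.modify (String.ofList [pc.2]) [] (· ++ [pc.1]))
    PySem.Dict.empty with hpos
  have hmapkey : l.map (fun pc => String.ofList [pc.2]) = chars.map (fun c => String.ofList [c]) := by
    rw [show (fun pc : Int × Char => String.ofList [pc.2]) = (fun c => String.ofList [c]) ∘ Prod.snd
        from rfl, ← List.map_map, hl, PySem.List.map_snd_enumerate]
  have hofmap : ∀ (xs : List Char) (s : PySem.Set Char),
      PySem.Set.update (s.map (fun c => String.ofList [c])) (xs.map (fun c => String.ofList [c])) =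
        (PySem.Set.update s xs).map (fun c => String.ofList [c]) := by
    intro xs
    induction xs with
    | nil => intro s; rfl
    | cons x xs ih =>
      intro s
      have hadd : PySem.Set.add (s.map (fun c => String.ofList [c])) (String.ofList [x]) =
          (PySem.Set.add s x).map (fun c => String.ofList [c]) := by
        have hc : PySem.Set.contains (s.map (fun c => String.ofList [c])) (String.ofList [x]) =
            PySem.Set.contains s x := by
          show (s.map (fun c => String.ofList [c])).contains (String.ofList [x]) = s.contains x
          rw [Bool.eq_iff_iff]
          simp only [List.contains_iff_mem, List.mem_map]
          constructor
          · rintro ⟨y, hy, hxy⟩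
            have hyx : y = x := pvKey_injective hxy
            exact List.contains_iff_mem.mpr (hyx ▸ hy)
          · intro h
            exact ⟨x, List.contains_iff_mem.mp h, rfl⟩
        unfold PySem.Set.add
        rw [hc]
        split_ifs
        · rfl
        · simp
      simp only [List.map_cons, PySem.Set.update, List.foldl_cons] at *
      rw [hadd, ih]
  have hkeys : positions.keys = (PySem.Set.ofList chars).map (fun c => String.ofList [c]) := by
    have h1 : positions.keys =
        PySem.Set.update ([] : PySem.Set String) (l.map (fun pc => String.ofList [pc.2])) := by
      rw [hpos]
      exact PySem.Dict.keys_foldl_modify_key l (fun pc => String.ofList [pc.2]) []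
        (fun _ pc xs => xs ++ [pc.1]) PySem.Dict.empty
    rw [h1, hmapkey]
    have h3 := hofmap chars ([] : PySem.Set Char)
    simpa using h3
  have hnodup : positions.keys.Nodup := by
    rw [hpos]
    exact PySem.Dict.nodup_keys_foldl_modify_key l _ [] _ _ (by simp)
  rw [PySem.Dict.items_eq_map_keys positions hnodup [], hkeys, List.map_map, List.map_map]
  apply List.map_congr_left
  intro c hc
  have hget : positions.getD (String.ofList [c]) [] =
      ((l.filter (fun pc => pc.2 == c)).map (·.1)) := by
    rw [hpos,
        show (l.foldl (fun (d : PySem.Dict String (List Int)) pc =>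
            d.modify (String.ofList [pc.2]) [] (· ++ [pc.1])) PySem.Dict.empty)
          = ((l.map (fun pc => (String.ofList [pc.2], pc.1))).foldl
            (fun d q => d.modify q.1 [] (· ++ [q.2])) PySem.Dict.empty) from by rw [List.foldl_map],
        PySem.Dict.getD_foldl_modify_append, List.filter_map, List.map_map]
    rw [List.filter_congr (fun pc _ => show ((fun q : String × Int => q.1 == String.ofList [c]) ∘
          (fun pc : Int × Char => (String.ofList [pc.2], pc.1))) pc = (pc.2 == c) from by
        by_cases h : pc.2 = c
        · simp [h]
        · simp [h, String.ofList_inj])]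
    simp
  simp only [Function.comp_apply]
  rw [hget, pvOccs_eq_flatMap]

-- ===== VERDICT (by name: the statement is the Claim_ definition above) =====
theorem function_name_spec : Claim_equal_function_name := by
  intro word _
  unfold Spec_function_name
  rw [pvA_eq, pvB_eq]
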